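-- pv_equiv track=rewrite | github.com/samelisha/vector_graph_rag | email_listener.py | is_no_reply
-- ===== SOURCE A (Python) =====
-- def is_no_reply(sender: str) -> bool:
--     """
--     Ignore automated/system-like senders.
--     """
--     blocked_keywords = [
--         "no-reply",
--         "noreply",
--         "donotreply",
--         "do-not-reply",
--         "mailer-daemon",
--         "postmaster",
--         "bounce",
--     ]
--     sender_lower = sender.lower()
--     return any(k in sender_lower for k in blocked_keywords)
-- ===== SOURCE B (Python) =====
-- def is_no_reply(sender: str) -> bool:
--     """
--     One left-to-right scan over positions: at each position test whether some
--     blocked keyword starts there (instead of seven separate substring scans).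
--     """
--     keywords = (
--         "no-reply",
--         "noreply",
--         "donotreply",
--         "do-not-reply",
--         "mailer-daemon",
--         "postmaster",
--         "bounce",
--     )
--     s = sender.lower()
--     for i in range(len(s) + 1):
--         if any(s.startswith(k, i) for k in keywords):
--             return True
--     return False
-- ===== Notes on version B (the rewrite author's own statement) =====
-- stated objective: alternative
-- what changed: Replaces seven independent substring-membership scans of the lowered sender with a single left-to-right positional scan that at each index checks whether any of the seven keywords starts there.
import Mathlib
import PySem

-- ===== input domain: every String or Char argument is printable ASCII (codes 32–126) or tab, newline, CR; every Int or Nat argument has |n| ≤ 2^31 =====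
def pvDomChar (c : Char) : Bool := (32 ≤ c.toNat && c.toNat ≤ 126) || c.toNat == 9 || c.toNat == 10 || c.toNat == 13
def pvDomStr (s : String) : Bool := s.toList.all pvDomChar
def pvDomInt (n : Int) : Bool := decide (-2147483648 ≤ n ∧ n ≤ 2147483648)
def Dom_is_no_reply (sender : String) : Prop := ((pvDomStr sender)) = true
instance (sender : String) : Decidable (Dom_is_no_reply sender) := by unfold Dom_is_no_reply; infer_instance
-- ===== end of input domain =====

-- B replaces A's seven independent substring-membership scans by a single
-- left-to-right positional scan testing keyword prefixes at each position (objective: alternative).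


-- ===== PORT A =====
def is_no_reply (sender : String) : Bool :=
  let blocked_keywords : List String :=
    ["no-reply", "noreply", "donotreply", "do-not-reply", "mailer-daemon", "postmaster", "bounce"]
  let sender_lower := PySem.Str.lower sender
  blocked_keywords.any (fun k => PySem.Str.isIn k sender_lower)

-- ===== PORT B =====
def pvAltKeywords : List (List Char) :=
  ["no-reply".toList, "noreply".toList, "donotreply".toList, "do-not-reply".toList,
   "mailer-daemon".toList, "postmaster".toList, "bounce".toList]

-- the loop 'for i in range(len(s)+1): if any(s.startswith(k, i) …)' as recursion over suffixes (position i = dropped prefix)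
def pvAltScan : List Char → Bool
  | [] => pvAltKeywords.any (fun k => PySem.Chars.startswith [] k)
  | c :: rest =>
    if pvAltKeywords.any (fun k => PySem.Chars.startswith (c :: rest) k) then true
    else pvAltScan rest

def is_no_reply_alt (sender : String) : Bool :=
  pvAltScan (PySem.Chars.lower sender.toList)

-- ===== PRECONDITION & SPEC =====
def Spec_is_no_reply (sender : String) (out : Bool) : Prop := out = is_no_reply_alt sender
instance (sender : String) (out : Bool) : Decidable (Spec_is_no_reply sender out) := by unfold Spec_is_no_reply; infer_instance

-- ===== CLAIM (what is proved, stated in full; the proofs are below) =====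
def Claim_equal_is_no_reply : Prop := ∀ (sender : String), Dom_is_no_reply sender → Spec_is_no_reply sender (is_no_reply sender)

-- ===== LEMMAS AND PROOFS =====

theorem pvAltScan_iff (s : List Char) :
    pvAltScan s = true ↔ ∃ k ∈ pvAltKeywords, ∃ n, k <+: s.drop n := by
  induction s with
  | nil =>
    simp only [pvAltScan, List.any_eq_true, PySem.Chars.startswith_iff, List.drop_nil]
    constructor
    · rintro ⟨k, hk, hp⟩; exact ⟨k, hk, 0, hp⟩
    · rintro ⟨k, hk, _, hp⟩; exact ⟨k, hk, hp⟩
  | cons c rest ih =>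
    simp only [pvAltScan]
    split_ifs with h
    · simp only [true_iff]
      rcases List.any_eq_true.mp h with ⟨k, hk, hp⟩
      exact ⟨k, hk, 0, by simpa [PySem.Chars.startswith_iff] using hp⟩
    · simp only [ih]
      constructor
      · rintro ⟨k, hk, n, hp⟩
        exact ⟨k, hk, n + 1, by simpa using hp⟩
      · rintro ⟨k, hk, n, hp⟩
        cases n with
        | zero =>
          exfalso; apply h
          exact List.any_eq_true.mpr ⟨k, hk, by simpa [PySem.Chars.startswith_iff] using hp⟩
        | succ m => exact ⟨k, hk, m, by simpa using hp⟩

theorem pvPorts_agree (sender : String) : is_no_reply sender = is_no_reply_alt sender := by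
  have hiff : is_no_reply sender = true ↔ is_no_reply_alt sender = true := by
    unfold is_no_reply is_no_reply_alt
    rw [pvAltScan_iff]
    simp only [List.any_eq_true, PySem.Str.isIn_iff_infix, PySem.Str.toList_lower]
    constructor
    · rintro ⟨k, hk, hinf⟩
      refine ⟨k.toList, ?_, ?_⟩
      · fin_cases hk <;> simp [pvAltKeywords]
      · exact (PySem.Chars.exists_prefix_drop_iff_isIn _ _).mpr
          ((PySem.Chars.isIn_iff_infix _ _).mpr hinf)
    · rintro ⟨k, hk, n, hp⟩
      have hinf : k <:+: PySem.Chars.lower sender.toList :=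
        (PySem.Chars.isIn_iff_infix _ _).mp
          ((PySem.Chars.exists_prefix_drop_iff_isIn _ _).mp ⟨n, hp⟩)
      fin_cases hk <;>
        [exact ⟨"no-reply", by simp, by simpa using hinf⟩;
         exact ⟨"noreply", by simp, by simpa using hinf⟩;
         exact ⟨"donotreply", by simp, by simpa using hinf⟩;
         exact ⟨"do-not-reply", by simp, by simpa using hinf⟩;
         exact ⟨"mailer-daemon", by simp, by simpa using hinf⟩;
         exact ⟨"postmaster", by simp, by simpa using hinf⟩;
         exact ⟨"bounce", by simp, by simpa using hinf⟩]
  cases hA : is_no_reply sender <;> cases hB : is_no_reply_alt sender <;> simp_all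

-- ===== VERDICT (by name: the statement is the Claim_ definition above) =====
theorem is_no_reply_spec : Claim_equal_is_no_reply := by
  intro sender _
  exact pvPorts_agree sender
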